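-- pv_equiv track=rewrite | github.com/UNO-Babb/homework-2-nolanelson9506 | BusSchedule.py | getHours
-- ===== SOURCE A (Python) =====
-- def getHours(time):
--   """
--   Take a time in the format "HH:MM A< and return hour in 24-hour format"
--   """
--   i = 0
--   while i < len(time) and time[i] == " ":
--     i = i + 1
--   hr_part = ""
--   while i < len(time) and time[i] >= "0" and time[i] <= "9":
--     hr_part = hr_part + time[i]
--     i = i + 1
--   if hr_part == "":
--     return 0
--
--   hour = int(hr_part)
--
--   if "PM" in time and hour < 12:
--     hour = hour + 12
--   if "AM" in time and hour == 12:
--     hour = 0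
--   return hour
-- ===== SOURCE B (Python) =====
-- def getHours(time):
--   """
--   Take a time in the format "HH:MM A< and return hour in 24-hour format"
--   """
--   rest = time.lstrip(' ')
--   digits = rest[:len(rest) - len(rest.lstrip('0123456789'))]
--   if not digits:
--     return 0
--   hour = int(digits)
--   if "PM" in time and hour < 12:
--     hour = hour + 12
--   if "AM" in time and hour == 12:
--     hour = 0
--   return hour
-- ===== Notes on version B (the rewrite author's own statement) =====
-- stated objective: idiomatic
-- what changed: Replaces A's two explicit index-based character-scanning while-loops (space skipping and digit accumulation) with loop-free str.lstrip calls plus slice arithmetic to extract the leading digit token.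
import Mathlib
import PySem

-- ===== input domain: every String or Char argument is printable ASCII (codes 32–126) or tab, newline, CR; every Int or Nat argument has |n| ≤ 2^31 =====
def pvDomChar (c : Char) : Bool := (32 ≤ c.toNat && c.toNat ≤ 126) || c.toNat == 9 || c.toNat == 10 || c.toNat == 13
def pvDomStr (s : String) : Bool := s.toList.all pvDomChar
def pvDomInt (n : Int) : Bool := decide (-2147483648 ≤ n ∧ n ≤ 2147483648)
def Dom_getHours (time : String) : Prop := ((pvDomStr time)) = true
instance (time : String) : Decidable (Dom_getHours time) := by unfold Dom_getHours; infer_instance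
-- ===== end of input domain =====

-- B replaces A's two explicit character-scanning while-loops with loop-free lstrip + slice arithmetic (idiomatic; same behaviour, return value only).


-- ===== PORT A =====
-- while i < len(time) and time[i] == " ": i += 1   (A's first while loop)
def pvSkipSpaces : List Char → List Char
  | [] => []
  | c :: cs => if c = ' ' then pvSkipSpaces cs else c :: cs

-- while i < len(time) and "0" <= time[i] <= "9": hr_part = hr_part + time[i]; i += 1   (A's second while loop)
def pvTakeDigits : List Char → List Char → List Char
  | acc, [] => acc
  | acc, c :: cs => if '0' ≤ c ∧ c ≤ '9' then pvTakeDigits (acc ++ [c]) cs else acc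

def getHours (time : String) : Int :=
  let rest := pvSkipSpaces time.toList
  let hrPart := pvTakeDigits [] rest
  if hrPart = [] then 0
  else
    -- int(hr_part); hrPart is a nonempty digit string, so ofChars? is some and the getD default is never hit
    let hour := (PySem.Int.ofChars? hrPart).getD 0
    let hour := if PySem.Str.isIn "PM" time && decide (hour < 12) then hour + 12 else hour
    let hour := if PySem.Str.isIn "AM" time && decide (hour = 12) then 0 else hour
    hour

-- ===== PORT B =====
-- membership in '0123456789' (the lstrip argument)
def pvIsDigitChar (c : Char) : Bool := "0123456789".toList.contains c

def getHours_alt (time : String) : Int :=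
  -- time.lstrip(' ') (hand port, exact: drops the leading space characters)
  let rest := time.toList.dropWhile (fun c => c == ' ')
  -- rest[:len(rest) - len(rest.lstrip('0123456789'))]
  let digits := rest.take (rest.length - (rest.dropWhile pvIsDigitChar).length)
  if digits = [] then 0
  else
    -- int(digits); digits is a nonempty digit string, so ofChars? is some and the getD default is never hit
    let hour := (PySem.Int.ofChars? digits).getD 0
    let hour := if PySem.Str.isIn "PM" time && decide (hour < 12) then hour + 12 else hour
    let hour := if PySem.Str.isIn "AM" time && decide (hour = 12) then 0 else hour
    hour

-- ===== PRECONDITION & SPEC =====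
def Spec_getHours (time : String) (out : Int) : Prop := out = getHours_alt time
instance (time : String) (out : Int) : Decidable (Spec_getHours time out) := by unfold Spec_getHours; infer_instance

-- ===== CLAIM (what is proved, stated in full; the proofs are below) =====
def Claim_equal_getHours : Prop := ∀ (time : String), Dom_getHours time → Spec_getHours time (getHours time)

-- ===== LEMMAS AND PROOFS =====

theorem digit_pred (c : Char) : pvIsDigitChar c = decide ('0' ≤ c ∧ c ≤ '9') := by
  obtain ⟨⟨⟨v, hvlt⟩⟩, hvalid⟩ := c
  simp only [pvIsDigitChar, show "0123456789".toList = ['0','1','2','3','4','5','6','7','8','9'] from rfl,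
    List.contains_eq_mem, List.mem_cons, List.not_mem_nil, or_false, Char.le_def, Char.ext_iff,
    UInt32.le_iff_toNat_le, UInt32.ext_iff]
  rw [decide_eq_decide]
  show (v = 48 ∨ v = 49 ∨ v = 50 ∨ v = 51 ∨ v = 52 ∨ v = 53 ∨ v = 54 ∨ v = 55 ∨ v = 56 ∨ v = 57) ↔
    (48 ≤ v ∧ v ≤ 57)
  omega

theorem pvSkipSpaces_eq_dropWhile (l : List Char) :
    pvSkipSpaces l = l.dropWhile (fun c => c == ' ') := by
  induction l with
  | nil => rfl
  | cons c cs ih => by_cases h : c = ' ' <;> simp [pvSkipSpaces, h, ih]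

theorem pvTakeDigits_eq (acc l : List Char) :
    pvTakeDigits acc l = acc ++ l.takeWhile pvIsDigitChar := by
  induction l generalizing acc with
  | nil => simp [pvTakeDigits]
  | cons c cs ih =>
    by_cases h : '0' ≤ c ∧ c ≤ '9'
    · have hd : pvIsDigitChar c = true := by rw [digit_pred]; exact decide_eq_true h
      simp [pvTakeDigits, h, ih, hd]
    · have hd : pvIsDigitChar c = false := by rw [digit_pred]; exact decide_eq_false h
      simp [pvTakeDigits, h, hd]

theorem take_sub_dropWhile {α : Type} (p : α → Bool) (l : List α) :
    l.take (l.length - (l.dropWhile p).length) = l.takeWhile p := by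
  induction l with
  | nil => rfl
  | cons c cs ih =>
    by_cases h : p c
    · have hle : (cs.dropWhile p).length ≤ cs.length := cs.length_dropWhile_le p
      rw [List.dropWhile_cons, if_pos h,
        show (c :: cs).length - (cs.dropWhile p).length
           = (cs.length - (cs.dropWhile p).length) + 1 from by simp; omega,
        List.take_succ_cons, ih, List.takeWhile_cons, if_pos h]
    · simp [h]

-- ===== VERDICT (by name: the statement is the Claim_ definition above) =====
theorem getHours_spec : Claim_equal_getHours := by
  intro time _
  unfold Spec_getHours
  simp only [getHours, getHours_alt, pvSkipSpaces_eq_dropWhile, pvTakeDigits_eq,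
    take_sub_dropWhile, List.nil_append]
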